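-- pv_equiv track=rewrite | github.com/stammt/advent-of-code | aoc2019/src/python/day16.py | solve
-- ===== SOURCE A (Python) =====
-- def solve(digits: list[int]) -> list[int]:
--     t = 0
--     for i in range(len(digits)):
--         t += digits[i]
--
--     updated = []
--     for i in range(len(digits)):
--         updated.append(t % 10)
--         t -= digits[i]
--     return updated
-- ===== SOURCE B (Python) =====
-- def solve(digits: list[int]) -> list[int]:
--     n = len(digits)
--     result = [0] * n
--     s = 0
--     for i in range(n - 1, -1, -1):
--         s += digits[i]
--         result[i] = s % 10
--     return result
-- ===== Notes on version B (the rewrite author's own statement) =====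
-- stated objective: simpler
-- what changed: Single backward pass maintaining a growing suffix sum written into a pre-sized result, instead of A's two passes (total-sum pass, then a forward pass that appends and decrements the total).
import Mathlib
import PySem

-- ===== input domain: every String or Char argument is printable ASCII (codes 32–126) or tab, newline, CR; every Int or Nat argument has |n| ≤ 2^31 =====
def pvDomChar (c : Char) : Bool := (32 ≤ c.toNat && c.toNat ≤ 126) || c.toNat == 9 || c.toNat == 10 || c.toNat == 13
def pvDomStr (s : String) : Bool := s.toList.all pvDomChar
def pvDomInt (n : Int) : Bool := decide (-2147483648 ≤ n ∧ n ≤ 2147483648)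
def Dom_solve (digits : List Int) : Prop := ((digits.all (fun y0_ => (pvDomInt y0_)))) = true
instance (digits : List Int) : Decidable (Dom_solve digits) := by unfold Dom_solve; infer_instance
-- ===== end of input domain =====

-- B replaces A's two passes (total sum, then forward append-and-decrement) by one backward pass
-- maintaining a growing suffix sum; same return value, objective: simpler.

-- ===== PORT A =====
def solve (digits : List Int) : List Int :=
  -- first loop: t = sum of digits by indexed access
  let t : Int := (PySem.List.pyRange 0 digits.length 1).foldl
    (fun t i => t + PySem.List.pyGetD digits i 0) 0
  -- second loop: append t % 10, then t -= digits[i]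
  let st := (PySem.List.pyRange 0 digits.length 1).foldl
    (fun (st : List Int × Int) i =>
      (st.1 ++ [PySem.Int.mod st.2 10], st.2 - PySem.List.pyGetD digits i 0)) ([], t)
  st.1

-- ===== PORT B =====
-- backward pass of Source B: walking from the end, the running suffix sum s grows; structurally,
-- processing the tail first and then prepending this position's s % 10. Returns (result, s).
def solveAltGo : List Int → List Int × Int
  | [] => ([], 0)
  | d :: rest =>
    let p := solveAltGo rest
    (PySem.Int.mod (p.2 + d) 10 :: p.1, p.2 + d)

def solve_alt (digits : List Int) : List Int := (solveAltGo digits).1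

-- ===== PRECONDITION & SPEC =====
def Spec_solve (digits : List Int) (out : List Int) : Prop := out = solve_alt digits
instance (digits : List Int) (out : List Int) : Decidable (Spec_solve digits out) := by unfold Spec_solve; infer_instance

-- ===== CLAIM (what is proved, stated in full; the proofs are below) =====
def Claim_equal_solve : Prop := ∀ (digits : List Int), Dom_solve digits → Spec_solve digits (solve digits)

-- ===== LEMMAS AND PROOFS =====

theorem solveAltGo_snd (ds : List Int) : (solveAltGo ds).2 = ds.sum := by
  induction ds with
  | nil => simp [solveAltGo]
  | cons d rest ih => simp [solveAltGo, ih]; ring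

theorem foldl_second_loop (ds : List Int) (acc : List Int) (t : Int) (ht : t = ds.sum) :
    (ds.foldl (fun (st : List Int × Int) d =>
      (st.1 ++ [PySem.Int.mod st.2 10], st.2 - d)) (acc, t)).1
    = acc ++ (solveAltGo ds).1 := by
  induction ds generalizing acc t with
  | nil => simp [solveAltGo]
  | cons d rest ih =>
    simp only [List.foldl_cons, solveAltGo]
    rw [ih (acc ++ [PySem.Int.mod t 10]) (t - d) (by rw [ht, List.sum_cons]; ring)]
    have hs : (solveAltGo rest).2 + d = t := by rw [solveAltGo_snd, ht, List.sum_cons]; ring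
    simp [hs]

-- ===== VERDICT (by name: the statement is the Claim_ definition above) =====
theorem solve_spec : Claim_equal_solve := by
  intro digits _
  unfold Spec_solve solve solve_alt
  simp only [PySem.List.foldl_pyRange_zero_pyGetD' digits 0 (fun t d => t + d) 0,
      PySem.List.foldl_pyRange_zero_pyGetD' digits 0
        (fun (st : List Int × Int) d => (st.1 ++ [PySem.Int.mod st.2 10], st.2 - d))]
  rw [foldl_second_loop digits [] _ (by simp [List.sum_eq_foldl])]
  simp
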